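-- pv_equiv track=rewrite | github.com/uripper/Zwicky | main.py | clean_transcript
-- ===== SOURCE A (Python) =====
-- def clean_transcript(transcript):
--     cleaned_words = []
--     subtitles_parsed = [i["text"] for i in transcript]
--     for i in subtitles_parsed:
--         i = (
--             i.replace("\n", " ")
--             .replace(".", " ")
--             .replace("(", "")
--             .replace(")", "")
--             .replace("?", "")
--         )
--         i = (
--             i.replace("!", "")
--             .replace(",", "")
--             .replace(";", "")
--             .replace(":", "")
--             .replace('"', "")
--             .replace("-", "")
--         )
--         words = i.split(" ")
--         cleaned_words.extend(i.lower() for i in words)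
--     return cleaned_words
-- ===== SOURCE B (Python) =====
-- SEPARATORS = {' ', '.', '\n'}   # chars A turns into token boundaries
-- REMOVED = set('()?!,;:"-')      # chars A deletes outright
--
--
-- def clean_transcript(transcript):
--     # Single char-by-char scan per entry instead of 11 whole-string replace
--     # passes followed by split: one pass, no intermediate strings.
--     out = []
--     for entry in transcript:
--         buf = []
--         for ch in entry["text"]:
--             if ch in REMOVED:
--                 continue
--             if ch in SEPARATORS:
--                 out.append(''.join(buf).lower())
--                 buf = []
--             else:
--                 buf.append(ch)
--         out.append(''.join(buf).lower())
--     return out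
-- ===== Notes on version B (the rewrite author's own statement) =====
-- stated objective: faster
-- what changed: Replaces A's eleven whole-string .replace passes plus split plus per-word lower with a single character-by-character state machine that builds each lowercased token in one pass.
import Mathlib
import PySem

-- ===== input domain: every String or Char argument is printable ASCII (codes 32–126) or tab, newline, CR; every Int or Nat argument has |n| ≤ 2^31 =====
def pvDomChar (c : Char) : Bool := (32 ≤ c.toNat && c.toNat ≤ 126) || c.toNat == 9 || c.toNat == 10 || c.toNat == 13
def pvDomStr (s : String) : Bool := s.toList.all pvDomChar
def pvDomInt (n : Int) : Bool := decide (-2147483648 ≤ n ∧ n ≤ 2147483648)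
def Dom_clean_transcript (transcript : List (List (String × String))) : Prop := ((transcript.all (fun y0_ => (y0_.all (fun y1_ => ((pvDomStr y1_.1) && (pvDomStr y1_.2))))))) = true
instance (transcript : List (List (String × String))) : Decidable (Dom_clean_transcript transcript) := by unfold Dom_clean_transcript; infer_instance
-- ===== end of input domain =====

-- B does a single char-by-char scan instead of A's eleven replace passes + split + lower.
-- A raises KeyError when an entry lacks the "text" key; those inputs are excluded by Pre_.

-- ===== PORT A =====
-- i["text"]; the "" default is unreachable under Pre_ (every entry contains "text")
def pvText (i : List (String × String)) : String := PySem.Dict.getD (PySem.Dict.mk i) "text" ""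

def clean_transcript (transcript : List (List (String × String))) : List String :=
  let subtitles_parsed := transcript.map (fun i => pvText i)
  subtitles_parsed.foldl (fun cleaned_words i =>
    let i1 := PySem.Str.replace i "\n" " "
    let i2 := PySem.Str.replace i1 "." " "
    let i3 := PySem.Str.replace i2 "(" ""
    let i4 := PySem.Str.replace i3 ")" ""
    let i5 := PySem.Str.replace i4 "?" ""
    let i6 := PySem.Str.replace i5 "!" ""
    let i7 := PySem.Str.replace i6 "," ""
    let i8 := PySem.Str.replace i7 ";" ""
    let i9 := PySem.Str.replace i8 ":" ""
    let i10 := PySem.Str.replace i9 "\"" ""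
    let i11 := PySem.Str.replace i10 "-" ""
    -- i.split(" "): sep is the nonempty literal " ", so split? is always some
    let words := (PySem.Str.split? i11 " ").getD []
    cleaned_words ++ words.map (fun w => PySem.Str.lower w)) []

-- ===== PORT B =====
def pvRemoved (c : Char) : Bool := ['(', ')', '?', '!', ',', ';', ':', '"', '-'].contains c
def pvSep (c : Char) : Bool := [' ', '.', '\n'].contains c

def pvScan : List Char → List Char → List String → List String
  | [], buf, out => out ++ [String.ofList (PySem.Chars.lower buf)]
  | c :: rest, buf, out =>
    if pvRemoved c then pvScan rest buf out
    else if pvSep c then pvScan rest [] (out ++ [String.ofList (PySem.Chars.lower buf)])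
    else pvScan rest (buf ++ [c]) out

def clean_transcript_alt (transcript : List (List (String × String))) : List String :=
  transcript.foldl (fun out entry =>
    pvScan (PySem.Dict.getD (PySem.Dict.mk entry) "text" "").toList [] out) []

-- ===== PRECONDITION & SPEC =====
-- Pre_ excludes exactly the inputs where A raises KeyError (an entry without the "text" key)
def Pre_clean_transcript (transcript : List (List (String × String))) : Prop :=
  ∀ i ∈ transcript, (PySem.Dict.mk i).contains "text" = true
instance (transcript : List (List (String × String))) : Decidable (Pre_clean_transcript transcript) := by unfold Pre_clean_transcript; infer_instance
def pvWitness_clean_transcript : (List (List (String × String))) := [[("text", "Hi There. (test)")], [("text", "A-B c")]]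

def Spec_clean_transcript (transcript : List (List (String × String))) (out : List String) : Prop := out = clean_transcript_alt transcript
instance (transcript : List (List (String × String))) (out : List String) : Decidable (Spec_clean_transcript transcript out) := by unfold Spec_clean_transcript; infer_instance

-- ===== CLAIM (what is proved, stated in full; the proofs are below) =====
def Claim_equal_clean_transcript : Prop := ∀ (transcript : List (List (String × String))), Dom_clean_transcript transcript → Pre_clean_transcript transcript → Spec_clean_transcript transcript (clean_transcript transcript)

-- ===== LEMMAS AND PROOFS =====

-- per-char effect of A's whole replace chain
def pvF (c : Char) : List Char :=
  if pvRemoved c then [] else if pvSep c then [' '] else [c]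

-- reference splitter: Chars.splitOn _ [' '] with an explicit current-word accumulator
def pvSplitC : List Char → List Char → List (List Char)
  | cur, [] => [cur.reverse]
  | cur, c :: cs => if ' ' = c then cur.reverse :: pvSplitC [] cs else pvSplitC (c :: cur) cs

theorem replace_go_char (o : Char) (n : List Char) :
    ∀ (cs acc : List Char) (f : Nat), cs.length ≤ f →
      PySem.Chars.replace.go [o] n f cs acc
        = acc.reverse ++ cs.flatMap (fun c => if o = c then n else [c]) := by
  intro cs
  induction cs with
  | nil =>
    intro acc f _
    cases f <;> simp [PySem.Chars.replace.go]
  | cons c rest ih =>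
    intro acc f hf
    cases f with
    | zero => simp at hf
    | succ f =>
      simp only [PySem.Chars.replace.go]
      split
      · next h =>
        simp only [List.isPrefixOf, Bool.and_true, beq_iff_eq] at h
        simp only [List.length_singleton, List.drop_one, List.tail_cons]
        rw [ih _ f (by simpa using hf)]
        simp [h]
      · next h =>
        simp only [List.isPrefixOf, Bool.and_true, beq_iff_eq] at h
        rw [ih _ f (by simpa using hf)]
        simp [h]

-- replace with a single-char old acts independently on each character
def pvR (o : Char) (n : List Char) (cs : List Char) : List Char :=
  cs.flatMap (fun c => if o = c then n else [c])

theorem pvR_cons (o : Char) (n : List Char) (c : Char) (cs : List Char) :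
    pvR o n (c :: cs) = (if o = c then n else [c]) ++ pvR o n cs := by simp [pvR]

theorem pvR_append (o : Char) (n : List Char) (xs ys : List Char) :
    pvR o n (xs ++ ys) = pvR o n xs ++ pvR o n ys := by simp [pvR]

theorem replace_char (cs : List Char) (o : Char) (n : List Char) :
    PySem.Chars.replace cs [o] n = pvR o n cs := by
  unfold pvR
  cases cs with
  | nil => simp [PySem.Chars.replace, PySem.Chars.replace.go]
  | cons c rest =>
    simp only [PySem.Chars.replace]
    rw [replace_go_char o n _ _ _ (by simp)]
    simp

theorem splitOn_go_spec :
    ∀ (cs cur : List Char) (acc : List (List Char)) (f : Nat), cs.length ≤ f →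
      PySem.Chars.splitOn.go [' '] f cs cur acc = acc.reverse ++ pvSplitC cur cs := by
  intro cs
  induction cs with
  | nil =>
    intro cur acc f _
    cases f <;> simp [PySem.Chars.splitOn.go, pvSplitC]
  | cons c rest ih =>
    intro cur acc f hf
    cases f with
    | zero => simp at hf
    | succ f =>
      simp only [PySem.Chars.splitOn.go]
      split
      · next h =>
        simp only [List.isPrefixOf, Bool.and_true, beq_iff_eq] at h
        simp only [List.length_singleton, List.drop_one, List.tail_cons]
        rw [ih _ _ f (by simpa using hf)]
        cases h
        simp [pvSplitC]
      · next h =>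
        simp only [List.isPrefixOf, Bool.and_true, beq_iff_eq] at h
        rw [ih _ _ f (by simpa using hf)]
        simp [pvSplitC, h]

theorem splitOn_char (cs : List Char) :
    PySem.Chars.splitOn cs [' '] = pvSplitC [] cs := by
  simp only [PySem.Chars.splitOn]
  rw [splitOn_go_spec _ _ _ _ (by simp)]
  simp

theorem scan_spec :
    ∀ (cs buf : List Char) (out : List String),
      pvScan cs buf out
        = out ++ (pvSplitC buf.reverse (cs.flatMap pvF)).map
            (fun w => String.ofList (PySem.Chars.lower w)) := by
  intro cs
  induction cs with
  | nil => intro buf out; simp [pvScan, pvSplitC]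
  | cons c rest ih =>
    intro buf out
    simp only [pvScan, List.flatMap_cons, pvF]
    by_cases hr : pvRemoved c
    · simp [hr, ih]
    · by_cases hs : pvSep c
      · simp only [hr, if_false, Bool.false_eq_true, hs, if_true]
        rw [ih]
        simp [pvSplitC]
      · have hne : ¬ (' ' = c) := by
          intro h; apply hs; rw [← h]; decide
        simp only [hr, hs, Bool.false_eq_true, if_false]
        rw [ih]
        simp [pvSplitC, hne]

theorem pvF_point (c : Char) :
    pvR '-' [] (pvR '"' [] (pvR ':' [] (pvR ';' [] (pvR ',' [] (pvR '!' [] (pvR '?' []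
      (pvR ')' [] (pvR '(' [] (pvR '.' [' ']
      (if '\n' = c then [' '] else [c])))))))))) = pvF c := by
  by_cases h1 : '\n' = c; · cases h1; decide
  by_cases h2 : '.' = c; · cases h2; decide
  by_cases h3 : '(' = c; · cases h3; decide
  by_cases h4 : ')' = c; · cases h4; decide
  by_cases h5 : '?' = c; · cases h5; decide
  by_cases h6 : '!' = c; · cases h6; decide
  by_cases h7 : ',' = c; · cases h7; decide
  by_cases h8 : ';' = c; · cases h8; decide
  by_cases h9 : ':' = c; · cases h9; decide
  by_cases h10 : '"' = c; · cases h10; decide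
  by_cases h11 : '-' = c; · cases h11; decide
  by_cases h12 : ' ' = c; · cases h12; decide
  have hr : pvRemoved c = false := by
    simp only [pvRemoved]
    simp
    exact ⟨Ne.symm h3, Ne.symm h4, Ne.symm h5, Ne.symm h6, Ne.symm h7, Ne.symm h8,
      Ne.symm h9, Ne.symm h10, Ne.symm h11⟩
  have hs : pvSep c = false := by
    simp only [pvSep]
    simp
    exact ⟨Ne.symm h12, Ne.symm h2, Ne.symm h1⟩
  simp [pvR, h1, h2, h3, h4, h5, h6, h7, h8, h9, h10, h11, pvF, hr, hs]

set_option maxHeartbeats 1000000 in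
theorem chain_eq (cs : List Char) :
    PySem.Chars.replace (PySem.Chars.replace (PySem.Chars.replace (PySem.Chars.replace
      (PySem.Chars.replace (PySem.Chars.replace (PySem.Chars.replace (PySem.Chars.replace
      (PySem.Chars.replace (PySem.Chars.replace (PySem.Chars.replace cs ['\n'] [' '])
      ['.'] [' ']) ['('] []) [')'] []) ['?'] []) ['!'] []) [','] []) [';'] []) [':'] [])
      ['"'] []) ['-'] [] = cs.flatMap pvF := by
  simp only [replace_char]
  induction cs with
  | nil => simp [pvR]
  | cons c rest ih =>
    simp only [pvR_cons, pvR_append, List.flatMap_cons, ih]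
    exact congrArg₂ (· ++ ·) (pvF_point c) rfl

theorem tokens_eq (s : String) :
    (((PySem.Str.split? (PySem.Str.replace (PySem.Str.replace (PySem.Str.replace
      (PySem.Str.replace (PySem.Str.replace (PySem.Str.replace (PySem.Str.replace
      (PySem.Str.replace (PySem.Str.replace (PySem.Str.replace (PySem.Str.replace
      s "\n" " ") "." " ") "(" "") ")" "") "?" "") "!" "") "," "") ";" "") ":" "")
      "\"" "") "-" "") " ").getD []).map (fun w => PySem.Str.lower w))
    = (pvSplitC [] (s.toList.flatMap pvF)).map
        (fun w => String.ofList (PySem.Chars.lower w)) := by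
  have h := chain_eq s.toList
  simp only [PySem.Str.replace, String.toList_ofList,
    show "\n".toList = ['\n'] from rfl, show ".".toList = ['.'] from rfl,
    show "(".toList = ['('] from rfl, show ")".toList = [')'] from rfl,
    show "?".toList = ['?'] from rfl, show "!".toList = ['!'] from rfl,
    show ",".toList = [','] from rfl, show ";".toList = [';'] from rfl,
    show ":".toList = [':'] from rfl, show "\"".toList = ['"'] from rfl,
    show "-".toList = ['-'] from rfl, show " ".toList = [' '] from rfl,
    show "".toList = ([] : List Char) from rfl]
  rw [h]
  simp [PySem.Str.split?, PySem.Chars.split?, splitOn_char, PySem.Str.lower]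

-- ===== VERDICT (by name: the statement is the Claim_ definition above) =====
theorem clean_transcript_spec : Claim_equal_clean_transcript := by
  intro t _ _
  unfold Spec_clean_transcript clean_transcript clean_transcript_alt
  simp only [List.foldl_map]
  apply PySem.List.foldl_congr_mem
  intro acc i _
  rw [scan_spec]
  simp only [pvText]
  rw [tokens_eq]
  simp
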